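-- pv_equiv track=rewrite | github.com/SlashScrash/proyecto-IP | PROYECTO-Intro_Progra.py | contar_recursiva
-- ===== SOURCE A (Python) =====
-- def contar_recursiva(matriz, i, minimo, buses, lineas):
--     if i == buses:
--         return 0
--
--     total = 0
--     for j in range(lineas):
--         total += matriz[i][j]
--     if total >= minimo:
--         return 1 + contar_recursiva(matriz, i + 1, minimo, buses, lineas)
--     else:
--         return contar_recursiva(matriz, i + 1, minimo, buses, lineas)
-- ===== SOURCE B (Python) =====
-- def contar_recursiva(matriz, i, minimo, buses, lineas):
--     count = 0
--     for r in range(i, buses):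
--         total = sum(matriz[r][j] for j in range(lineas))
--         if total >= minimo:
--             count += 1
--     return count
-- ===== Notes on version B (the rewrite author's own statement) =====
-- stated objective: simpler
-- what changed: Replaces the tail recursion over rows with a single explicit loop over range(i, buses) that keeps a count accumulator, with the row total computed by sum() over a generator instead of a manual accumulation loop.
import Mathlib
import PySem

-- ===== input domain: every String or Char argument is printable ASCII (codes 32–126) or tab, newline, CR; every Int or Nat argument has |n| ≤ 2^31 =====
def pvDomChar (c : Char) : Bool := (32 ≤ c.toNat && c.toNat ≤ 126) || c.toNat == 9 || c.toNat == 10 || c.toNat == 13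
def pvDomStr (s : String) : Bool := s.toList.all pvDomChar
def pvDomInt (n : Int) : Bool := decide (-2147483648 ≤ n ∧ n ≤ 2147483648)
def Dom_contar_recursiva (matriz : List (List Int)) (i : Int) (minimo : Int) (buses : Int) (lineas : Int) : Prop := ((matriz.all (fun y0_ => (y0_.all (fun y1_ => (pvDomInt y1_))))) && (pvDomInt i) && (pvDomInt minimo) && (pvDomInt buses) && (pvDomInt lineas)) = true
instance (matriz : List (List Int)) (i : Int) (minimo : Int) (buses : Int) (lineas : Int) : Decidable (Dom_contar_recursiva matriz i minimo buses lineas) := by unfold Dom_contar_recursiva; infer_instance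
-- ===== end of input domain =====

-- B replaces A's tail recursion over rows by one explicit counting loop over range(i, buses)
-- (simpler: constant stack, same cost); A raises (IndexError on out-of-range indices,
-- infinite recursion/RecursionError when i > buses) outside Pre_, where nothing is claimed.

-- ===== PORT A =====
-- fuel (buses - i).toNat only makes the recursion total; on Pre_ (i ≤ buses) it runs
-- out exactly when i == buses, matching A's base case.
def pvContarA (matriz : List (List Int)) (minimo : Int) (lineas : Int) : Nat → Int → Int
  | 0, _ => 0
  | n+1, i =>
    let total := (PySem.List.pyRange 0 lineas 1).foldl
      (fun t j => t + PySem.List.pyGetD (PySem.List.pyGetD matriz i []) j 0) 0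
    if total ≥ minimo then 1 + pvContarA matriz minimo lineas n (i + 1)
    else pvContarA matriz minimo lineas n (i + 1)

def contar_recursiva (matriz : List (List Int)) (i : Int) (minimo : Int) (buses : Int) (lineas : Int) : Int :=
  pvContarA matriz minimo lineas (buses - i).toNat i

-- ===== PORT B =====
def contar_recursiva_alt (matriz : List (List Int)) (i : Int) (minimo : Int) (buses : Int) (lineas : Int) : Int :=
  (PySem.List.pyRange i buses 1).foldl
    (fun count r =>
      let total := ((PySem.List.pyRange 0 lineas 1).map
        (fun j => PySem.List.pyGetD (PySem.List.pyGetD matriz r []) j 0)).sum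
      if total ≥ minimo then count + 1 else count) 0

-- ===== PRECONDITION & SPEC =====
-- Pre_ = exactly the inputs where Python A returns: i ≤ buses (else the recursion never
-- reaches its base case and A raises RecursionError), and — unless lineas ≤ 0, when
-- nothing is ever indexed — every row index in [i, buses) in range for matriz (allowing
-- Python's negative wraparound, handled identically by both ports) with each such row
-- at least lineas long (else IndexError).
def Pre_contar_recursiva (matriz : List (List Int)) (i : Int) (minimo : Int) (buses : Int) (lineas : Int) : Prop :=
  i ≤ buses ∧
  (buses ≤ i ∨ lineas ≤ 0 ∨
    (-(matriz.length : Int) ≤ i ∧ buses ≤ (matriz.length : Int) ∧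
      ∀ p ∈ PySem.List.enumerate matriz 0,
        ((i ≤ p.1 ∧ p.1 < buses) ∨ (i ≤ p.1 - matriz.length ∧ p.1 - matriz.length < buses)) →
        lineas ≤ (p.2.length : Int)))
instance (matriz : List (List Int)) (i : Int) (minimo : Int) (buses : Int) (lineas : Int) : Decidable (Pre_contar_recursiva matriz i minimo buses lineas) := by unfold Pre_contar_recursiva; infer_instance

def pvWitness_contar_recursiva : List (List Int) × Int × Int × Int × Int :=
  ([[1, 2], [0, 0]], 0, 2, 2, 2)

def Spec_contar_recursiva (matriz : List (List Int)) (i : Int) (minimo : Int) (buses : Int) (lineas : Int) (out : Int) : Prop := out = contar_recursiva_alt matriz i minimo buses lineas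
instance (matriz : List (List Int)) (i : Int) (minimo : Int) (buses : Int) (lineas : Int) (out : Int) : Decidable (Spec_contar_recursiva matriz i minimo buses lineas out) := by unfold Spec_contar_recursiva; infer_instance

-- ===== CLAIM (what is proved, stated in full; the proofs are below) =====
def Claim_equal_contar_recursiva : Prop := ∀ (matriz : List (List Int)) (i : Int) (minimo : Int) (buses : Int) (lineas : Int), Dom_contar_recursiva matriz i minimo buses lineas → Pre_contar_recursiva matriz i minimo buses lineas → Spec_contar_recursiva matriz i minimo buses lineas (contar_recursiva matriz i minimo buses lineas)


-- ===== LEMMAS AND PROOFS =====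

-- A's manual accumulation of the row total equals B's sum over the mapped range.
lemma pvTotal_eq (g : Int → Int) (xs : List Int) :
    ∀ c : Int, xs.foldl (fun t j => t + g j) c = c + (xs.map g).sum := by
  induction xs with
  | nil => intro c; simp
  | cons x xs ih => intro c; simp [List.foldl, ih]; ring

-- B's counting loop computes A's recursion, for any accumulator.
lemma pvLoop_eq (matriz : List (List Int)) (minimo lineas buses : Int) :
    ∀ (n : Nat) (i : Int), (buses - i).toNat = n →
    ∀ c : Int,
      (PySem.List.pyRange i buses 1).foldl
        (fun count r =>
          let total := ((PySem.List.pyRange 0 lineas 1).map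
            (fun j => PySem.List.pyGetD (PySem.List.pyGetD matriz r []) j 0)).sum
          if total ≥ minimo then count + 1 else count) c
      = c + pvContarA matriz minimo lineas n i := by
  intro n
  induction n with
  | zero =>
    intro i hn c
    rw [show PySem.List.pyRange i buses 1 = [] from PySem.List.pyRange_one_eq_nil (by omega)]
    simp [pvContarA]
  | succ n ih =>
    intro i hn c
    rw [show PySem.List.pyRange i buses 1 = i :: PySem.List.pyRange (i+1) buses 1 from PySem.List.pyRange_one_cons (by omega)]
    simp only [List.foldl_cons]
    rw [ih (i + 1) (by omega)]
    simp only [pvContarA]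
    rw [pvTotal_eq]
    simp only [zero_add]
    split_ifs with h
    · ring
    · ring

-- ===== VERDICT (by name: the statement is the Claim_ definition above) =====
theorem contar_recursiva_spec : Claim_equal_contar_recursiva := by
  intro matriz i minimo buses lineas _ hpre
  unfold Spec_contar_recursiva contar_recursiva contar_recursiva_alt
  rw [pvLoop_eq matriz minimo lineas buses (buses - i).toNat i rfl 0, zero_add]
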